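-- pv_equiv track=rewrite | github.com/himukyd/Graph-Sparsification-for-High-Performance-Graph-Neural-Networks | Plots/global_sparsification_plot.py | split_none
-- ===== SOURCE A (Python) =====
-- def split_none(xvals, yvals):
--     """Split into continuous segments around None values."""
--     segments = []
--     seg_x, seg_y = [], []
--     for xi, yi in zip(xvals, yvals):
--         if yi is not None:
--             seg_x.append(xi)
--             seg_y.append(yi)
--         else:
--             if seg_x:
--                 segments.append((seg_x[:], seg_y[:]))
--             seg_x, seg_y = [], []
--     if seg_x:
--         segments.append((seg_x, seg_y))
--     return segments
-- ===== SOURCE B (Python) =====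
-- from itertools import groupby
--
-- def split_none(xvals, yvals):
--     """Split into continuous segments around None values."""
--     segments = []
--     for is_none, group in groupby(zip(xvals, yvals), key=lambda p: p[1] is None):
--         if not is_none:
--             pts = list(group)
--             segments.append(([p[0] for p in pts], [p[1] for p in pts]))
--     return segments
-- ===== Notes on version B (the rewrite author's own statement) =====
-- stated objective: idiomatic
-- what changed: Replaces the manual accumulator loop with per-element flush logic by itertools.groupby runs keyed on 'y is None': non-None runs are materialized and unzipped directly, removing the mutable seg_x/seg_y state and the trailing flush.
import Mathlib
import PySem

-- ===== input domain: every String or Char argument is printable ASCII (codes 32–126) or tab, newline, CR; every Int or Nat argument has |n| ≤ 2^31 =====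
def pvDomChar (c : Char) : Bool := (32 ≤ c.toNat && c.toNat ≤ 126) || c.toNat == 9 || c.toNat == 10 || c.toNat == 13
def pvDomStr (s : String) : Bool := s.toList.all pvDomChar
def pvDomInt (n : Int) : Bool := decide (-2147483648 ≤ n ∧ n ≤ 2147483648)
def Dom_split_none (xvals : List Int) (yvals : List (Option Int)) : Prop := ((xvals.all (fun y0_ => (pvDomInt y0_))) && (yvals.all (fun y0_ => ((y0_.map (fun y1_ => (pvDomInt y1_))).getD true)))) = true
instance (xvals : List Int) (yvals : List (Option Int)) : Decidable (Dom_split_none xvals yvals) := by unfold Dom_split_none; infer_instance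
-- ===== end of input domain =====

-- B replaces A's mutable seg_x/seg_y accumulator loop (with per-element flush logic and a
-- trailing flush) by grouping the zipped pairs into maximal runs keyed on "y is None"
-- (itertools.groupby) and unzipping each non-None run directly; objective: more idiomatic.

-- ===== PORT A =====
-- one iteration of A's for-loop over (xi, yi), state = (segments, seg_x, seg_y)
def aStep (st : List (List Int × List Int) × List Int × List Int) (p : Int × Option Int) :
    List (List Int × List Int) × List Int × List Int :=
  match p.2 with
  | some y => (st.1, st.2.1 ++ [p.1], st.2.2 ++ [y])
  | none => if st.2.1 ≠ [] then (st.1 ++ [(st.2.1, st.2.2)], [], []) else (st.1, [], [])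

-- A's trailing "if seg_x: segments.append((seg_x, seg_y))"
def aFin (st : List (List Int × List Int) × List Int × List Int) : List (List Int × List Int) :=
  if st.2.1 ≠ [] then st.1 ++ [(st.2.1, st.2.2)] else st.1

def split_none (xvals : List Int) (yvals : List (Option Int)) : List (List Int × List Int) :=
  aFin ((xvals.zip yvals).foldl aStep ([], [], []))

-- ===== PORT B =====
-- port of itertools.groupby with key p.2.isNone: maximal runs of equal key, in order
def runs (zs : List (Int × Option Int)) : List (Bool × List (Int × Option Int)) :=
  match zs with
  | [] => []
  | p :: ps =>
    (p.2.isNone, p :: ps.takeWhile (fun q => q.2.isNone == p.2.isNone)) ::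
      runs (ps.dropWhile (fun q => q.2.isNone == p.2.isNone))
termination_by zs.length
decreasing_by
  simp only [List.length_cons]
  exact Nat.lt_succ_of_le (List.length_dropWhile_le _ _)

-- body of B's for-loop over groupby's (is_none, pts) pairs; the y-components of a
-- non-None run are all `some`, so [p[1] for p in pts] is ported as filterMap Prod.snd
def bStep (segs : List (List Int × List Int)) (g : Bool × List (Int × Option Int)) :
    List (List Int × List Int) :=
  if g.1 then segs else segs ++ [(g.2.map Prod.fst, g.2.filterMap Prod.snd)]

def split_none_alt (xvals : List Int) (yvals : List (Option Int)) : List (List Int × List Int) :=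
  (runs (xvals.zip yvals)).foldl bStep []

-- ===== PRECONDITION & SPEC =====
def Spec_split_none (xvals : List Int) (yvals : List (Option Int)) (out : List (List Int × List Int)) : Prop := out = split_none_alt xvals yvals
instance (xvals : List Int) (yvals : List (Option Int)) (out : List (List Int × List Int)) : Decidable (Spec_split_none xvals yvals out) := by unfold Spec_split_none; infer_instance

-- ===== CLAIM (what is proved, stated in full; the proofs are below) =====
def Claim_equal_split_none : Prop := ∀ (xvals : List Int) (yvals : List (Option Int)), Dom_split_none xvals yvals → Spec_split_none xvals yvals (split_none xvals yvals)

-- ===== LEMMAS AND PROOFS =====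

-- A's loop over a run of non-None pairs just extends seg_x/seg_y
theorem foldl_aStep_some (ps : List (Int × Option Int)) (segs : List (List Int × List Int))
    (sx sy : List Int) (h : ∀ p ∈ ps, p.2.isSome) :
    ps.foldl aStep (segs, sx, sy)
      = (segs, sx ++ ps.map Prod.fst, sy ++ ps.filterMap Prod.snd) := by
  induction ps generalizing sx sy with
  | nil => simp
  | cons p ps ih =>
    obtain ⟨y, hy⟩ := Option.isSome_iff_exists.mp (h p (by simp))
    simp only [List.foldl_cons, aStep, hy]
    rw [ih _ _ (fun q hq => h q (by simp [hq]))]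
    simp [hy]

-- A's loop over a run of None pairs with empty seg_x does nothing
theorem foldl_aStep_none (ps : List (Int × Option Int)) (segs : List (List Int × List Int))
    (h : ∀ p ∈ ps, p.2 = none) :
    ps.foldl aStep (segs, [], []) = (segs, [], []) := by
  induction ps with
  | nil => rfl
  | cons p ps ih =>
    simp only [List.foldl_cons, aStep, h p (by simp)]
    rw [if_neg (by simp)]
    exact ih (fun q hq => h q (by simp [hq]))

theorem dropWhile_head_false {α : Type} (p : α → Bool) (l : List α) (q : α)
    (qs : List α) (h : l.dropWhile p = q :: qs) : p q = false := by
  induction l with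
  | nil => simp at h
  | cons a as ih =>
    by_cases hp : p a
    · rw [List.dropWhile_cons_of_pos hp] at h; exact ih h
    · rw [List.dropWhile_cons_of_neg hp] at h
      cases h; simpa using hp

theorem main_lemma : ∀ (n : Nat) (zs : List (Int × Option Int)), zs.length ≤ n →
    ∀ segs, aFin (zs.foldl aStep (segs, [], [])) = (runs zs).foldl bStep segs := by
  intro n
  induction n with
  | zero =>
    intro zs hz segs
    have hnil : zs = [] := by
      cases zs with
      | nil => rfl
      | cons a as => simp at hz
    subst hnil
    simp [aFin, runs]
  | succ n ih =>
    intro zs hz segs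
    match zs with
    | [] => simp [aFin, runs]
    | p :: ps =>
      have hzs : ps.length ≤ n := by simpa using hz
      rw [runs]
      match hp : p.2 with
      | none =>
        -- a None-run: A's loop leaves the state unchanged, B skips the group
        simp only [Option.isNone_none]
        have hsplit := List.takeWhile_append_dropWhile
          (p := fun q : Int × Option Int => q.2.isNone == true) (l := ps)
        have hdwlen : (ps.dropWhile (fun q : Int × Option Int => q.2.isNone == true)).length ≤ n :=
          le_trans (List.length_dropWhile_le _ _) hzs
        have htw : ∀ q ∈ ps.takeWhile (fun q : Int × Option Int => q.2.isNone == true),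
            q.2 = none := by
          intro q hq
          have hpq := List.mem_takeWhile_imp hq
          simpa using hpq
        have hstep : aStep (segs, [], []) p = (segs, [], []) := by
          simp [aStep, hp]
        rw [List.foldl_cons, hstep]
        conv_lhs => rw [← hsplit]
        rw [List.foldl_append, foldl_aStep_none _ _ htw, ih _ hdwlen]
        simp [bStep]
      | some y =>
        -- a non-None run: A's loop accumulates exactly the unzipped run, then flushes
        simp only [Option.isNone_some]
        have hsplit := List.takeWhile_append_dropWhile
          (p := fun q : Int × Option Int => q.2.isNone == false) (l := ps)
        have hdwlen : (ps.dropWhile (fun q : Int × Option Int => q.2.isNone == false)).length ≤ n :=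
          le_trans (List.length_dropWhile_le _ _) hzs
        set grp := p :: ps.takeWhile (fun q : Int × Option Int => q.2.isNone == false)
          with hgrp
        have hgrpSome : ∀ q ∈ grp, q.2.isSome := by
          intro q hq
          rcases List.mem_cons.mp hq with h1 | h1
          · subst h1; simp [hp]
          · have hpq := List.mem_takeWhile_imp h1
            simp at hpq
            cases hq2 : q.2 <;> simp_all
        have hfold : grp.foldl aStep (segs, [], [])
            = (segs, grp.map Prod.fst, grp.filterMap Prod.snd) := by
          simpa using foldl_aStep_some grp segs [] [] hgrpSome
        have hrw : (p :: ps).foldl aStep (segs, [], [])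
            = (ps.dropWhile (fun q : Int × Option Int => q.2.isNone == false)).foldl aStep
                (segs, grp.map Prod.fst, grp.filterMap Prod.snd) := by
          conv_lhs => rw [show p :: ps
            = grp ++ ps.dropWhile (fun q : Int × Option Int => q.2.isNone == false) by
              rw [hgrp, List.cons_append, hsplit]]
          rw [List.foldl_append, hfold]
        rw [hrw]
        have hbstep : bStep segs (false, grp)
            = segs ++ [(grp.map Prod.fst, grp.filterMap Prod.snd)] := by
          simp [bStep]
        rw [List.foldl_cons, hbstep]
        match hdw : ps.dropWhile (fun q : Int × Option Int => q.2.isNone == false) with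
        | [] =>
          simp [aFin, runs, hgrp]
        | q :: qs =>
          have hq2 : q.2 = none := by
            have hqf := dropWhile_head_false _ _ q qs hdw
            simpa using hqf
          have hstepq : aStep (segs, grp.map Prod.fst, grp.filterMap Prod.snd) q
              = (segs ++ [(grp.map Prod.fst, grp.filterMap Prod.snd)], [], []) := by
            simp [aStep, hq2, hgrp]
          have hstepq' : aStep (segs ++ [(grp.map Prod.fst, grp.filterMap Prod.snd)], [], []) q
              = (segs ++ [(grp.map Prod.fst, grp.filterMap Prod.snd)], [], []) := by
            simp [aStep, hq2]
          have hIH := ih (q :: qs) (by rw [← hdw]; exact hdwlen)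
            (segs ++ [(grp.map Prod.fst, grp.filterMap Prod.snd)])
          rw [List.foldl_cons, hstepq'] at hIH
          rw [List.foldl_cons, hstepq]
          exact hIH

-- ===== VERDICT (by name: the statement is the Claim_ definition above) =====
theorem split_none_spec : Claim_equal_split_none := by
  intro xvals yvals _
  unfold Spec_split_none split_none split_none_alt
  exact main_lemma (xvals.zip yvals).length _ le_rfl []
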